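-- pv_equiv track=rewrite | github.com/Nicotico2000/Blokus_GenAI | src/blokus/pieces.py | apply_transform
-- ===== SOURCE A (Python) =====
-- Coordinate = tuple[int, int]
--
-- def normalize_cells(cells: tuple[Coordinate, ...] | list[Coordinate]) -> tuple[Coordinate, ...]:
--     """Shift a cell set so its top-left occupied square becomes the origin."""
--
--     min_x = min(x for x, _ in cells)
--     min_y = min(y for _, y in cells)
--     normalized = sorted((x - min_x, y - min_y) for x, y in cells)
--     return tuple(normalized)
--
-- def _rotate_clockwise(cells: tuple[Coordinate, ...]) -> tuple[Coordinate, ...]: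
--     """Rotate a cell set 90 degrees clockwise around the local origin."""
--
--     return tuple((y, -x) for x, y in cells)
--
-- def _flip_horizontally(cells: tuple[Coordinate, ...]) -> tuple[Coordinate, ...]:
--     """Mirror a cell set across the vertical axis through the origin."""
--
--     return tuple((-x, y) for x, y in cells)
--
-- def apply_transform(
--     cells: tuple[Coordinate, ...],
--     rotation: int = 0,
--     flipped: bool = False,
-- ) -> tuple[Coordinate, ...]:
--     """Apply the requested reflection and rotation, then normalize the result."""
--
--     transformed = cells
--     if flipped:
--         transformed = _flip_horizontally(transformed)
--     for _ in range(rotation % 4):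
--         transformed = _rotate_clockwise(transformed)
--     return normalize_cells(transformed)
-- ===== SOURCE B (Python) =====
-- # B: replace the iterative 90-degree rotation loop by a single closed-form
-- # linear map chosen from a coefficient table indexed by rotation % 4.
--
-- Coordinate = tuple[int, int]
--
-- # (a, b, c, d) maps (x, y) -> (a*x + b*y, c*x + d*y); entry r is rotation by r*90deg clockwise.
-- _COEFFS = ((1, 0, 0, 1), (0, 1, -1, 0), (-1, 0, 0, -1), (0, -1, 1, 0))
--
-- def _normalize(cells):
--     min_x = min(x for x, _ in cells)
--     min_y = min(y for _, y in cells)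
--     return tuple(sorted((x - min_x, y - min_y) for x, y in cells))
--
-- def apply_transform(cells, rotation=0, flipped=False):
--     a, b, c, d = _COEFFS[rotation % 4]
--     if flipped:
--         a, c = -a, -c
--     return _normalize(tuple((a * x + b * y, c * x + d * y) for x, y in cells))
-- ===== Notes on version B (the rewrite author's own statement) =====
-- stated objective: simpler
-- what changed: B replaces A's loop that composes 90-degree rotations one at a time with a single linear map (a*x+b*y, c*x+d*y) whose coefficients come from a table indexed by rotation % 4 (x-negated when flipped), applied in one pass before the same normalization.
-- outside the precondition, e.g. on apply_transform((), 1, False): A raises ValueError, B raises ValueError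
import Mathlib
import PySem

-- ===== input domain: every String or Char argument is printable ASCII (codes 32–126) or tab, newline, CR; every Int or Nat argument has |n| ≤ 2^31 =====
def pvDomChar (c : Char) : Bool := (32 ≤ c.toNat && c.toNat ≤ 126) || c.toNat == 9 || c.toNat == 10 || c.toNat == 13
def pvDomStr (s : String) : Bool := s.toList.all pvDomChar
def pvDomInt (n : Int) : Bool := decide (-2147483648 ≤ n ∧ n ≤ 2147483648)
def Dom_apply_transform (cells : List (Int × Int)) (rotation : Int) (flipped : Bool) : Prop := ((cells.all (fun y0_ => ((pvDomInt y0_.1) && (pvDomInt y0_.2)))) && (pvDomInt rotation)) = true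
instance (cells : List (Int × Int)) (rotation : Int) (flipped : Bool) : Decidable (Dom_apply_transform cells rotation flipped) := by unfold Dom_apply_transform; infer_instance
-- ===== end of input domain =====

-- B replaces A's iterative composition of 90° rotations by one closed-form linear
-- map picked from a coefficient table indexed by rotation % 4 (objective: simpler).

-- ===== PORT A =====
-- shared normalization helper (identical code in Source A's normalize_cells and Source B's _normalize):
-- min is PySem.List.min?; empty cells (Python ValueError) are excluded by Pre_, so getD's default is unreachable there
def pvNormalize (cells : List (Int × Int)) : List (Int × Int) :=
  let minX : Int := ((PySem.List.min? (cells.map Prod.fst) (fun v => v)).getD 0)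
  let minY : Int := ((PySem.List.min? (cells.map Prod.snd) (fun v => v)).getD 0)
  PySem.List.sorted2 (cells.map (fun p => (p.1 - minX, p.2 - minY))) Prod.fst Prod.snd

def pvRotateCW (cells : List (Int × Int)) : List (Int × Int) :=
  cells.map (fun p => (p.2, -p.1))

def pvFlipH (cells : List (Int × Int)) : List (Int × Int) :=
  cells.map (fun p => (-p.1, p.2))

def apply_transform (cells : List (Int × Int)) (rotation : Int) (flipped : Bool) : List (Int × Int) :=
  let transformed := if flipped then pvFlipH cells else cells
  let transformed :=
    (PySem.List.pyRange 0 (PySem.Int.mod rotation 4) 1).foldl (fun t _ => pvRotateCW t) transformed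
  pvNormalize transformed

-- ===== PORT B =====
def pvCoeffs : List (Int × Int × Int × Int) :=
  [(1, 0, 0, 1), (0, 1, -1, 0), (-1, 0, 0, -1), (0, -1, 1, 0)]

def apply_transform_alt (cells : List (Int × Int)) (rotation : Int) (flipped : Bool) : List (Int × Int) :=
  -- rotation % 4 ∈ [0, 4) so the table lookup always succeeds; getD's default is unreachable
  let q := (PySem.List.pyGet? pvCoeffs (PySem.Int.mod rotation 4)).getD (0, 0, 0, 0)
  let a := if flipped then -q.1 else q.1
  let b := q.2.1
  let c := if flipped then -q.2.2.1 else q.2.2.1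
  let d := q.2.2.2
  pvNormalize (cells.map (fun p => (a * p.1 + b * p.2, c * p.1 + d * p.2)))

-- ===== PRECONDITION & SPEC =====
-- Pre_ excludes only the empty cell list, on which Python's min() raises ValueError.
def Pre_apply_transform (cells : List (Int × Int)) (rotation : Int) (flipped : Bool) : Prop :=
  cells ≠ []
instance (cells : List (Int × Int)) (rotation : Int) (flipped : Bool) : Decidable (Pre_apply_transform cells rotation flipped) := by unfold Pre_apply_transform; infer_instance

def pvWitness_apply_transform : (List (Int × Int)) × Int × Bool := ([(0, 0), (1, 0), (1, 2)], 3, true)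

def Spec_apply_transform (cells : List (Int × Int)) (rotation : Int) (flipped : Bool) (out : List (Int × Int)) : Prop := out = apply_transform_alt cells rotation flipped
instance (cells : List (Int × Int)) (rotation : Int) (flipped : Bool) (out : List (Int × Int)) : Decidable (Spec_apply_transform cells rotation flipped out) := by unfold Spec_apply_transform; infer_instance

-- ===== CLAIM (what is proved, stated in full; the proofs are below) =====
def Claim_equal_apply_transform : Prop := ∀ (cells : List (Int × Int)) (rotation : Int) (flipped : Bool), Dom_apply_transform cells rotation flipped → Pre_apply_transform cells rotation flipped → Spec_apply_transform cells rotation flipped (apply_transform cells rotation flipped)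

-- ===== LEMMAS AND PROOFS =====

-- rotation % 4 is one of 0, 1, 2, 3
lemma pvMod4_cases (rotation : Int) :
    PySem.Int.mod rotation 4 = 0 ∨ PySem.Int.mod rotation 4 = 1 ∨
    PySem.Int.mod rotation 4 = 2 ∨ PySem.Int.mod rotation 4 = 3 := by
  have h1 := PySem.Int.mod_nonneg rotation (b := 4) (by norm_num)
  have h2 := PySem.Int.mod_lt rotation (b := 4) (by norm_num)
  omega

-- the transformed point lists agree, case by case on rotation % 4 and the flip
lemma pvTransformed_eq (cells : List (Int × Int)) (rotation : Int) (flipped : Bool) :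
    ((PySem.List.pyRange 0 (PySem.Int.mod rotation 4) 1).foldl (fun t _ => pvRotateCW t)
        (if flipped then pvFlipH cells else cells)) =
      (cells.map (fun p =>
        ((if flipped then -(((PySem.List.pyGet? pvCoeffs (PySem.Int.mod rotation 4)).getD (0,0,0,0)).1)
          else ((PySem.List.pyGet? pvCoeffs (PySem.Int.mod rotation 4)).getD (0,0,0,0)).1) * p.1 +
          ((PySem.List.pyGet? pvCoeffs (PySem.Int.mod rotation 4)).getD (0,0,0,0)).2.1 * p.2,
         (if flipped then -(((PySem.List.pyGet? pvCoeffs (PySem.Int.mod rotation 4)).getD (0,0,0,0)).2.2.1)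
          else ((PySem.List.pyGet? pvCoeffs (PySem.Int.mod rotation 4)).getD (0,0,0,0)).2.2.1) * p.1 +
          ((PySem.List.pyGet? pvCoeffs (PySem.Int.mod rotation 4)).getD (0,0,0,0)).2.2.2 * p.2))) := by
  rcases pvMod4_cases rotation with h | h | h | h <;> rw [h] <;>
    cases flipped <;>
    simp [pvRotateCW, pvFlipH, pvCoeffs, PySem.List.pyGet?, PySem.List.pyIdx?,
      PySem.List.pyRange, List.range_succ, List.foldl, List.map_map, Function.comp]

-- ===== VERDICT (by name: the statement is the Claim_ definition above) =====
theorem apply_transform_spec : Claim_equal_apply_transform := by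
  intro cells rotation flipped _ _
  unfold Spec_apply_transform apply_transform apply_transform_alt
  dsimp only
  exact congrArg pvNormalize (pvTransformed_eq cells rotation flipped)
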